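-- pv_equiv track=rewrite | github.com/2016bits/nlp | scripts/evaluate_search.py | get_raw_document
-- ===== SOURCE A (Python) =====
-- def get_raw_document(evidence_list):
--     # evidence format: [[[_, _, doc, sentence_index]]]
--     documents = []
--     for evidence in evidence_list:
--         doc_list = []
--         for _, _, doc, _ in evidence:
--             if doc not in doc_list:
--                 doc_list.append(doc)
--         if doc_list not in documents:
--             documents.append(doc_list)
--     return documents
-- ===== SOURCE B (Python) =====
-- def get_raw_document(evidence_list):
--     # B: staged passes. Dedup by repeated filtering: take the first element,
--     # then drop all its duplicates from the remainder and repeat; applied to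
--     # the projected doc column of each evidence, then to the list of doc-lists.
--     def dedup(xs):
--         out = []
--         while xs:
--             h = xs[0]
--             out.append(h)
--             xs = [x for x in xs[1:] if x != h]
--         return out
--     return dedup([dedup([t[2] for t in ev]) for ev in evidence_list])
-- ===== Notes on version B (the rewrite author's own statement) =====
-- stated objective: alternative
-- what changed: Replaces A's single pass with 'x not in accumulator' membership scans by staged passes that dedup via repeated filtering: pop the first element and filter all its duplicates out of the remaining suffix, at both the per-evidence and the doc-list level.
import Mathlib
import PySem

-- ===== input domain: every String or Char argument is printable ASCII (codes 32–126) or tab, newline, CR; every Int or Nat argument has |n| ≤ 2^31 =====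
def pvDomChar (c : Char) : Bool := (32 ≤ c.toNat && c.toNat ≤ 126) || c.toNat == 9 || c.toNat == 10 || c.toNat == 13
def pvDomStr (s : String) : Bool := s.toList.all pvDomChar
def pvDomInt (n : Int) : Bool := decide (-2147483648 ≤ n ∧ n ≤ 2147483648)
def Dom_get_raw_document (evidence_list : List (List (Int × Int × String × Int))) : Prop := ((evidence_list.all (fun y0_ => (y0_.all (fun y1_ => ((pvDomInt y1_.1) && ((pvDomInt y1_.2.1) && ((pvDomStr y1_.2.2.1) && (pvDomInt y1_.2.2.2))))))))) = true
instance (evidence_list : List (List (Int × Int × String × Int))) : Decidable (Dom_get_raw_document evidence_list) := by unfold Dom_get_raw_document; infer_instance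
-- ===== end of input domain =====

-- B changes structure only (dedup by repeated filtering, in staged passes); same values, no speed claim.

-- ===== PORT A =====
def get_raw_document (evidence_list : List (List (Int × Int × String × Int))) : List (List String) :=
  evidence_list.foldl
    (fun documents evidence =>
      let doc_list := evidence.foldl
        (fun dl t => if dl.contains t.2.2.1 then dl else dl ++ [t.2.2.1]) []
      if documents.contains doc_list then documents else documents ++ [doc_list])
    []

-- ===== PORT B =====
-- B's while loop: append the head, filter its duplicates out of the rest, repeat.
def pvDedupLoop {α : Type} [DecidableEq α] (out : List α) (xs : List α) : List α :=
  match xs with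
  | [] => out
  | h :: t => pvDedupLoop (out ++ [h]) (t.filter (fun x => x ≠ h))
termination_by xs.length
decreasing_by simpa using Nat.lt_succ_of_le (le_trans (List.length_filter_le _ _) (by simp))

def get_raw_document_alt (evidence_list : List (List (Int × Int × String × Int))) : List (List String) :=
  pvDedupLoop [] (evidence_list.map (fun ev => pvDedupLoop [] (ev.map (fun t => t.2.2.1))))

-- ===== PRECONDITION & SPEC =====
def Spec_get_raw_document (evidence_list : List (List (Int × Int × String × Int))) (out : List (List String)) : Prop := out = get_raw_document_alt evidence_list
instance (evidence_list : List (List (Int × Int × String × Int))) (out : List (List String)) : Decidable (Spec_get_raw_document evidence_list out) := by unfold Spec_get_raw_document; infer_instance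

-- ===== CLAIM (what is proved, stated in full; the proofs are below) =====
def Claim_equal_get_raw_document : Prop := ∀ (evidence_list : List (List (Int × Int × String × Int))), Dom_get_raw_document evidence_list → Spec_get_raw_document evidence_list (get_raw_document evidence_list)

-- ===== LEMMAS AND PROOFS =====

-- A-style dedup: foldl with a membership test, generic in the element type.
def pvIns {α : Type} [DecidableEq α] (acc : List α) (ys : List α) : List α :=
  ys.foldl (fun dl d => if dl.contains d then dl else dl ++ [d]) acc

theorem pvIns_cons {α : Type} [DecidableEq α] (acc : List α) (h : α) (t : List α) :
    pvIns acc (h :: t) = pvIns (if acc.contains h then acc else acc ++ [h]) t := rfl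

-- Filtering out an element already in the accumulator does not change pvIns.
theorem pvIns_filter {α : Type} [DecidableEq α] (a : α) :
    ∀ (t acc : List α), a ∈ acc →
      pvIns acc (t.filter (fun x => x ≠ a)) = pvIns acc t := by
  intro t
  induction t with
  | nil => intro acc _; rfl
  | cons h tl ih =>
    intro acc ha
    by_cases hh : h = a
    · subst hh
      rw [List.filter_cons, if_neg (by simp)]
      have hstep : pvIns acc (h :: tl) = pvIns acc tl := by
        rw [pvIns_cons, if_pos (by simpa [List.contains_eq_mem] using ha)]
      rw [hstep]
      exact ih acc ha
    · rw [List.filter_cons, if_pos (by simp [hh])]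
      rw [pvIns_cons, pvIns_cons]
      by_cases hc : acc.contains h = true
      · rw [if_pos hc]
        exact ih acc ha
      · rw [if_neg hc]
        exact ih (acc ++ [h]) (by simp [ha])

-- Main invariant: when the remaining input is disjoint from the accumulator,
-- B's filter loop computes exactly A's membership-scan dedup.
theorem pvDedupLoop_eq_pvIns {α : Type} [DecidableEq α] :
    ∀ (n : Nat) (xs : List α), xs.length ≤ n → ∀ acc : List α,
      (∀ x ∈ xs, acc.contains x = false) → pvDedupLoop acc xs = pvIns acc xs := by
  intro n
  induction n with
  | zero =>
    intro xs hlen acc _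
    have hx : xs = [] := List.eq_nil_of_length_eq_zero (Nat.le_zero.mp hlen)
    subst hx
    simp only [pvDedupLoop]
    rfl
  | succ n ih =>
    intro xs hlen acc hdisj
    match xs with
    | [] =>
      simp only [pvDedupLoop]
      rfl
    | h :: t =>
      have hh : acc.contains h = false := hdisj h (by simp)
      have hlen' : (t.filter (fun x => x ≠ h)).length ≤ n :=
        Nat.le_of_lt_succ (Nat.lt_of_le_of_lt (List.length_filter_le _ _)
          (Nat.lt_of_lt_of_le (Nat.lt_succ_self _) hlen))
      have hdisj' : ∀ x ∈ t.filter (fun x => x ≠ h), (acc ++ [h]).contains x = false := by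
        intro x hx
        have hxt := List.mem_of_mem_filter hx
        have hxh : x ≠ h := by
          have := List.of_mem_filter hx; simpa using this
        have := hdisj x (by simp [hxt])
        simp_all
      have e1 : pvDedupLoop acc (h :: t) =
          pvDedupLoop (acc ++ [h]) (t.filter (fun x => x ≠ h)) := by
        simp only [pvDedupLoop]
      rw [e1, ih _ hlen' _ hdisj', pvIns_filter h t (acc ++ [h]) (by simp), pvIns_cons]
      rw [if_neg (by simpa using hh)]

theorem pvDedupLoop_eq_pvIns' {α : Type} [DecidableEq α] (xs : List α) :
    pvDedupLoop ([] : List α) xs = pvIns [] xs :=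
  pvDedupLoop_eq_pvIns xs.length xs (Nat.le_refl _) [] (by intro x _; rfl)

-- B's inner pass equals A's inner loop.
theorem innerB_eq (ev : List (Int × Int × String × Int)) :
    pvDedupLoop [] (ev.map (fun t => t.2.2.1)) =
      ev.foldl (fun dl t => if dl.contains t.2.2.1 then dl else dl ++ [t.2.2.1]) [] := by
  rw [pvDedupLoop_eq_pvIns']
  unfold pvIns
  rw [List.foldl_map]

-- The two List-String BEq instances (default vs derived from DecidableEq) agree on contains.
theorem contains_beq_eq (x : List (List String)) (d : List String) :
    @List.contains (List String) List.instBEq x d =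
      @List.contains (List String) instBEqOfDecidableEq x d := by
  simp [List.contains_eq_mem]

-- ===== VERDICT (by name: the statement is the Claim_ definition above) =====
theorem get_raw_document_spec : Claim_equal_get_raw_document := by
  intro evidence_list _
  unfold Spec_get_raw_document get_raw_document get_raw_document_alt
  rw [pvDedupLoop_eq_pvIns']
  unfold pvIns
  rw [List.foldl_map]
  simp only [innerB_eq, contains_beq_eq]
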